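-- pv_equiv track=rewrite | github.com/pypi-data/pypi-mirror-402 | packages/paddleformers/paddleformers-1.0.0-py3-none-any.whl/paddleformers/transformers/conversion_utils.py | _resolve_prefix_keys_for_fuse_and_split
-- ===== SOURCE A (Python) =====
-- def _resolve_prefix_keys_for_fuse_and_split(state_keys_base, state_keys_real, ignore_error=False, is_fuse=True):
--     state_keys_map = {}
--
--     # use the tuple (x1,x2,x3,x4) as one key, and the prefix of x1,x2,x3 is used as a new key x4 or
--     # the last key x4 is used as new keys x1,x2,x3. And, the tuple also could be (a) (x1, x1) -> convert x1 to x1;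
--     # (b) (x1,x2,x3) -> fuse x1 and x2 to x3; (c) (x1,x2,x3,x4) -> fuse x1, x2 and x3 to x4.
--
--     # is_fuse: True -> fuse, False -> split
--     # True: (x1,x2,x3,x4) -> [x1,x2,x3] are exist in state_keys_real, x4 is not exist in state_keys_real
--     # False: (x1,x2,x3,x4) -> [x1,x2,x3] are not exist in state_keys_real, x4 is exist in state_keys_real
--
--     for keys in state_keys_base:
--         prefix = ""
--         if is_fuse:
--             for x in state_keys_real:
--                 for base_key in keys[:-1]:
--                     if x.endswith(base_key):
--                         prefix = x.replace(base_key, "")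
--                         break
--                 if prefix != "":
--                     break
--         else:
--             base_key = keys[-1]
--             for x in state_keys_real:
--                 if x.endswith(base_key):
--                     prefix = x.replace(base_key, "")
--                     break
--
--         new_keys = tuple([prefix + key for key in keys])
--         state_keys_map[keys] = new_keys
--
--     return state_keys_map
-- ===== SOURCE B (Python) =====
-- def _resolve_prefix_keys_for_fuse_and_split(state_keys_base, state_keys_real, ignore_error=False, is_fuse=True):
--     # Per base tuple, index its base keys by string (first index wins) and probe each real
--     # key's suffixes of the occurring lengths in that hash index, instead of scanning all
--     # base keys per real key.
--     def fuse_prefix(keys):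
--         idx = {}
--         for i, b in enumerate(keys[:-1]):
--             if b not in idx:
--                 idx[b] = i
--         lengths = sorted({len(b) for b in idx})
--         for x in state_keys_real:
--             n = len(x)
--             cands = [idx[x[n - l:]] for l in lengths if l <= n and x[n - l:] in idx]
--             if cands:
--                 p = x.replace(keys[min(cands)], "")
--                 if p != "":
--                     return p
--         return ""
--
--     def split_prefix(keys):
--         b = keys[-1]
--         return next((x.replace(b, "") for x in state_keys_real if x.endswith(b)), "")
--
--     out = {}
--     for keys in state_keys_base:
--         prefix = fuse_prefix(keys) if is_fuse else split_prefix(keys)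
--         out[keys] = tuple(prefix + k for k in keys)
--     return out
-- ===== Notes on version B (the rewrite author's own statement) =====
-- stated objective: alternative
-- what changed: Per base tuple, B builds a hash index of the base keys (first index wins) plus the set of their lengths, and finds each real key's best-matching base key by probing its suffixes of those lengths in the index, instead of A's linear scan over all base keys for every real key.
import Mathlib
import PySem

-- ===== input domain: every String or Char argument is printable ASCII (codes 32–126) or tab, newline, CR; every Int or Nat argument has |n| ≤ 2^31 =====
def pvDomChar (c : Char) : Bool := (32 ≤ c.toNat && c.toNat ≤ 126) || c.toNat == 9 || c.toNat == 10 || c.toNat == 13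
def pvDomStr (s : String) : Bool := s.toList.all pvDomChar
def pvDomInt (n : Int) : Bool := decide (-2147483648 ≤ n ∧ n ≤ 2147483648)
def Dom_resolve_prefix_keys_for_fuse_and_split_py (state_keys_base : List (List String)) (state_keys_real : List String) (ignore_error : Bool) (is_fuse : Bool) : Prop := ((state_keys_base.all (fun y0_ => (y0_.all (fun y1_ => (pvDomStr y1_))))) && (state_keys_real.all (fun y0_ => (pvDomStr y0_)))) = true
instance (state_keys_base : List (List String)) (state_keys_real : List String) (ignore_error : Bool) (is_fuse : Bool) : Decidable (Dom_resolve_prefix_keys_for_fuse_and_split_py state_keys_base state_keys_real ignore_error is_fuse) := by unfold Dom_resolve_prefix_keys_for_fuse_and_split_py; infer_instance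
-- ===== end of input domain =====

-- B replaces A's per-real-key linear scan over the base keys by a per-tuple hash index of the
-- base keys probed at each occurring suffix length (objective: alternative algorithm, same cost
-- on the measured inputs).

-- ===== PORT A =====
-- inner loop 'for base_key in keys[:-1]: if x.endswith(base_key): …; break' — first matching base key
def pvEndsA (x : String) : List String → Option String
  | [] => none
  | b :: bs => if PySem.Str.endswith x b then some b else pvEndsA x bs

-- fuse branch: 'for x in state_keys_real: …; if prefix != "": break'
def pvFuseA (bks : List String) : List String → String
  | [] => ""
  | x :: rest =>
    match pvEndsA x bks with
    | some b =>
      let p := PySem.Str.replace x b ""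
      if p ≠ "" then p else pvFuseA bks rest
    | none => pvFuseA bks rest

-- split branch: first x with x.endswith(base_key)
def pvSplitA (bk : String) : List String → String
  | [] => ""
  | x :: rest => if PySem.Str.endswith x bk then PySem.Str.replace x bk "" else pvSplitA bk rest

def resolve_prefix_keys_for_fuse_and_split_py (state_keys_base : List (List String)) (state_keys_real : List String) (ignore_error : Bool) (is_fuse : Bool) : List (List String × List String) :=
  (state_keys_base.foldl (fun (d : PySem.Dict (List String) (List String)) keys =>
      let pfx :=
        if is_fuse then pvFuseA keys.dropLast state_keys_real   -- keys[:-1] (dropLast is exact)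
        else pvSplitA (PySem.List.pyGetD keys (-1) "") state_keys_real   -- keys[-1]; keys ≠ [] under Pre_
      d.insert keys (keys.map (fun k => pfx ++ k)))
    PySem.Dict.empty).items

-- ===== PORT B =====
-- idx = {}; for i, b in enumerate(keys[:-1]): if b not in idx: idx[b] = i
def pvIdxB (bks : List String) : PySem.Dict String Int :=
  (PySem.List.enumerate bks).foldl
    (fun d p => if d.contains p.2 then d else d.insert p.2 p.1) PySem.Dict.empty

-- lengths = sorted({len(b) for b in idx})
def pvLensB (idx : PySem.Dict String Int) : List Int :=
  PySem.List.sorted (PySem.Set.ofList (idx.keys.map PySem.Str.len)) (fun l => l) false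

-- cands = [idx[x[n-l:]] for l in lengths if l <= n and x[n-l:] in idx]
def pvCandsB (idx : PySem.Dict String Int) (lens : List Int) (x : String) : List Int :=
  lens.filterMap (fun l =>
    if l ≤ PySem.Str.len x then idx.get? (PySem.Str.slice x (some (PySem.Str.len x - l)) none)
    else none)

-- for x in state_keys_real: …; if cands: p = x.replace(keys[min(cands)], ""); if p != "": return p
def pvFuseLoopB (keys : List String) (idx : PySem.Dict String Int) (lens : List Int) : List String → String
  | [] => ""
  | x :: rest =>
    match PySem.List.min? (pvCandsB idx lens x) (fun j => j) with
    | some j =>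
      let p := PySem.Str.replace x (PySem.List.pyGetD keys j "") ""
      if p ≠ "" then p else pvFuseLoopB keys idx lens rest
    | none => pvFuseLoopB keys idx lens rest

def pvFuseB (keys : List String) (skr : List String) : String :=
  pvFuseLoopB keys (pvIdxB keys.dropLast) (pvLensB (pvIdxB keys.dropLast)) skr

-- next((x.replace(b, "") for x in state_keys_real if x.endswith(b)), "")
def pvSplitB (bk : String) (skr : List String) : String :=
  match skr.find? (fun x => PySem.Str.endswith x bk) with
  | some x => PySem.Str.replace x bk ""
  | none => ""

def resolve_prefix_keys_for_fuse_and_split_py_alt (state_keys_base : List (List String)) (state_keys_real : List String) (ignore_error : Bool) (is_fuse : Bool) : List (List String × List String) :=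
  (state_keys_base.foldl (fun (d : PySem.Dict (List String) (List String)) keys =>
      let pfx :=
        if is_fuse then pvFuseB keys state_keys_real
        else pvSplitB (PySem.List.pyGetD keys (-1) "") state_keys_real
      d.insert keys (keys.map (fun k => pfx ++ k)))
    PySem.Dict.empty).items

-- ===== PRECONDITION & SPEC =====
-- Pre_ excludes exactly the inputs where Python A raises IndexError: is_fuse=False with an
-- empty base tuple (keys[-1]); B raises there too.
def Pre_resolve_prefix_keys_for_fuse_and_split_py (state_keys_base : List (List String)) (state_keys_real : List String) (ignore_error : Bool) (is_fuse : Bool) : Prop :=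
  is_fuse = true ∨ ∀ ks ∈ state_keys_base, ks ≠ []
instance (state_keys_base : List (List String)) (state_keys_real : List String) (ignore_error : Bool) (is_fuse : Bool) : Decidable (Pre_resolve_prefix_keys_for_fuse_and_split_py state_keys_base state_keys_real ignore_error is_fuse) := by unfold Pre_resolve_prefix_keys_for_fuse_and_split_py; infer_instance

def pvWitness_resolve_prefix_keys_for_fuse_and_split_py : List (List String) × List String × Bool × Bool :=
  ([["q1", "k1", "v1", "qkv1"], ["q2", "k2", "v2", "qkv2"]], ["model.q1", "model.k1", "model.v1"], false, true)

def Spec_resolve_prefix_keys_for_fuse_and_split_py (state_keys_base : List (List String)) (state_keys_real : List String) (ignore_error : Bool) (is_fuse : Bool) (out : List (List String × List String)) : Prop := out = resolve_prefix_keys_for_fuse_and_split_py_alt state_keys_base state_keys_real ignore_error is_fuse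
instance (state_keys_base : List (List String)) (state_keys_real : List String) (ignore_error : Bool) (is_fuse : Bool) (out : List (List String × List String)) : Decidable (Spec_resolve_prefix_keys_for_fuse_and_split_py state_keys_base state_keys_real ignore_error is_fuse out) := by unfold Spec_resolve_prefix_keys_for_fuse_and_split_py; infer_instance

-- ===== CLAIM (what is proved, stated in full; the proofs are below) =====
def Claim_equal_resolve_prefix_keys_for_fuse_and_split_py : Prop := ∀ (state_keys_base : List (List String)) (state_keys_real : List String) (ignore_error : Bool) (is_fuse : Bool), Dom_resolve_prefix_keys_for_fuse_and_split_py state_keys_base state_keys_real ignore_error is_fuse → Pre_resolve_prefix_keys_for_fuse_and_split_py state_keys_base state_keys_real ignore_error is_fuse → Spec_resolve_prefix_keys_for_fuse_and_split_py state_keys_base state_keys_real ignore_error is_fuse (resolve_prefix_keys_for_fuse_and_split_py state_keys_base state_keys_real ignore_error is_fuse)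

-- ===== LEMMAS AND PROOFS =====

-- the split branch: first-match recursion = find?-based form
theorem pvSplit_eq (bk : String) (skr : List String) : pvSplitA bk skr = pvSplitB bk skr := by
  induction skr with
  | nil => rfl
  | cons x rest ih =>
    simp only [pvSplitA, pvSplitB, List.find?_cons, PySem.Str.endswith_eq]
    by_cases h : PySem.Chars.endswith x.toList bk.toList = true <;> simp [h, ih, pvSplitB]

-- idx lookup = first index of the string among the base keys
theorem pvIdx_loop (bks : List String) (s0 : Int) (d : PySem.Dict String Int) (t : String) :
    ((PySem.List.enumerate bks s0).foldl
      (fun d p => if d.contains p.2 then d else d.insert p.2 p.1) d).get? t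
    = (d.get? t).or ((PySem.List.index? bks t).map (fun n : Nat => (n : Int) + s0)) := by
  induction bks generalizing s0 d with
  | nil =>
    have h0 : PySem.List.index? ([] : List String) t = none :=
      (PySem.List.index?_eq_none_iff _ _).mpr (by simp)
    rw [PySem.List.enumerate_nil, List.foldl_nil, h0, Option.map_none, Option.or_none]
  | cons b bs ih =>
    rw [PySem.List.enumerate_cons, List.foldl_cons]
    by_cases hbt : b = t
    · subst hbt
      rw [PySem.List.index?_cons_self]
      by_cases hc : d.contains b
      · rw [if_pos hc, ih]
        have hs : (d.get? b).isSome := by rw [← PySem.Dict.contains_eq_isSome_get?]; exact hc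
        obtain ⟨v, hv⟩ := Option.isSome_iff_exists.mp hs
        rw [hv, Option.some_or, Option.some_or]
      · rw [if_neg hc, ih]
        have hge : d.get? b = none := by
          cases h : d.get? b with
          | none => rfl
          | some v =>
            have hs : (d.get? b).isSome := by simp [h]
            rw [← PySem.Dict.contains_eq_isSome_get?] at hs
            simp [hc] at hs
        rw [PySem.Dict.get?_insert_self, hge, Option.some_or, Option.none_or,
          Option.map_some]
        norm_num
    · rw [PySem.List.index?_cons_of_ne bs hbt]
      have harith : ∀ o : Option Nat,
          Option.map (fun n : Nat => (n : Int) + s0) (Option.map (fun n => n + 1) o)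
          = Option.map (fun n : Nat => (n : Int) + (s0 + 1)) o := by
        intro o; cases o with
        | none => rfl
        | some n => simp only [Option.map_some]; congr 1; push_cast; ring
      by_cases hc : d.contains b
      · rw [if_pos hc, ih, harith]
      · rw [if_neg hc, ih, PySem.Dict.get?_insert_of_ne _ _ (fun h => hbt h.symm), harith]

theorem pvIdx_get (bks : List String) (t : String) :
    (pvIdxB bks).get? t = (PySem.List.index? bks t).map (fun n : Nat => (n : Int)) := by
  have h := pvIdx_loop bks 0 PySem.Dict.empty t
  rw [pvIdxB, h, PySem.Dict.get?_empty, Option.none_or]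
  cases ho : PySem.List.index? bks t <;> simp

theorem pvIdx_keys (bks : List String) (t : String) :
    t ∈ (pvIdxB bks).keys ↔ t ∈ bks := by
  rw [← PySem.Dict.contains_iff_mem_keys, PySem.Dict.contains_eq_isSome_get?, pvIdx_get,
    Option.isSome_map]
  exact PySem.List.index?_isSome_iff bks t

theorem pvLens_mem (bks : List String) (l : Int) :
    l ∈ pvLensB (pvIdxB bks) ↔ ∃ s ∈ bks, PySem.Str.len s = l := by
  rw [pvLensB, PySem.List.mem_sorted, PySem.Set.mem_ofList, List.mem_map]
  constructor
  · rintro ⟨s, hs, rfl⟩; exact ⟨s, (pvIdx_keys bks s).mp hs, rfl⟩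
  · rintro ⟨s, hs, rfl⟩; exact ⟨s, (pvIdx_keys bks s).mpr hs, rfl⟩

-- candidate list = first indices of base keys that are suffixes of x
theorem pvCands_mem (bks : List String) (x : String) (j : Int) :
    j ∈ pvCandsB (pvIdxB bks) (pvLensB (pvIdxB bks)) x
    ↔ ∃ s n, PySem.List.index? bks s = some n ∧ j = (n : Int)
        ∧ PySem.Str.endswith x s = true := by
  constructor
  · intro hj
    rw [pvCandsB, List.mem_filterMap] at hj
    obtain ⟨l, hl, hif⟩ := hj
    by_cases hle : l ≤ PySem.Str.len x
    swap
    · rw [if_neg hle] at hif; exact absurd hif (by simp)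
    rw [if_pos hle] at hif
    set s := PySem.Str.slice x (some (PySem.Str.len x - l)) none with hs
    rw [pvIdx_get] at hif
    obtain ⟨n, hn, rfl⟩ := Option.map_eq_some_iff.mp hif
    refine ⟨s, n, hn, rfl, ?_⟩
    rw [PySem.Str.endswith_eq, PySem.Chars.endswith_iff]
    have h0 : (0 : Int) ≤ PySem.Str.len x - l := by omega
    have hts : s.toList = x.toList.drop (PySem.Str.len x - l).toNat := by
      rw [hs, PySem.Str.toList_slice, PySem.Chars.slice_eq_listSlice,
        PySem.List.slice_from _ h0]
    rw [hts]; exact List.drop_suffix _ _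
  · rintro ⟨s, n, hn, rfl, hend⟩
    have hmem : s ∈ bks := (PySem.List.index?_isSome_iff bks s).mp (by rw [hn]; rfl)
    have hsuf : s.toList <:+ x.toList := by
      rw [PySem.Str.endswith_eq, PySem.Chars.endswith_iff] at hend; exact hend
    have hlen : s.toList.length ≤ x.toList.length := hsuf.length_le
    have hle : PySem.Str.len s ≤ PySem.Str.len x := by
      rw [PySem.Str.len_eq, PySem.Str.len_eq]; exact_mod_cast hlen
    rw [pvCandsB, List.mem_filterMap]
    refine ⟨PySem.Str.len s, (pvLens_mem bks _).mpr ⟨s, hmem, rfl⟩, ?_⟩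
    rw [if_pos hle]
    have hseq : PySem.Str.slice x (some (PySem.Str.len x - PySem.Str.len s)) none = s := by
      apply String.toList_inj.mp
      have h0 : (0 : Int) ≤ PySem.Str.len x - PySem.Str.len s := by omega
      rw [PySem.Str.toList_slice, PySem.Chars.slice_eq_listSlice, PySem.List.slice_from _ h0]
      have htn : (PySem.Str.len x - PySem.Str.len s).toNat
          = x.toList.length - s.toList.length := by
        rw [PySem.Str.len_eq, PySem.Str.len_eq]; omega
      rw [htn]
      exact (List.suffix_iff_eq_drop.mp hsuf).symm
    rw [hseq, pvIdx_get, hn, Option.map_some]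

-- A\'s inner loop, via the first matching index
theorem pvEndsA_eq (x : String) (bks : List String) :
    pvEndsA x bks
    = (List.findIdx? (fun b => PySem.Str.endswith x b) bks).map (fun n => bks.getD n "") := by
  induction bks with
  | nil => rfl
  | cons b bs ih =>
    by_cases h : PySem.Chars.endswith x.toList b.toList = true
    · simp [pvEndsA, List.findIdx?_cons, PySem.Str.endswith_eq, h]
    · simp only [pvEndsA, List.findIdx?_cons, PySem.Str.endswith_eq, h, if_neg,
        Bool.false_eq_true, not_false_iff, ih, Option.map_map, if_false]
      cases hf : List.findIdx? (fun b => PySem.Chars.endswith x.toList b.toList) bs <;>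
        simp [hf]

-- B\'s min over the candidate list = A\'s first matching index
theorem pvMin_cands (bks : List String) (x : String) :
    PySem.List.min? (pvCandsB (pvIdxB bks) (pvLensB (pvIdxB bks)) x) (fun j => j)
    = (List.findIdx? (fun b => PySem.Str.endswith x b) bks).map (fun n : Nat => (n : Int)) := by
  cases hf : List.findIdx? (fun b => PySem.Str.endswith x b) bks with
  | none =>
    have hnone : ∀ b ∈ bks, PySem.Str.endswith x b = false := by
      have := List.findIdx?_eq_none_iff.mp hf
      intro b hb; simpa using this b hb
    have hnil : pvCandsB (pvIdxB bks) (pvLensB (pvIdxB bks)) x = [] := by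
      apply List.eq_nil_iff_forall_not_mem.mpr
      intro j hj
      obtain ⟨s, n, hn, rfl, hend⟩ := (pvCands_mem bks x _).mp hj
      have hmem : s ∈ bks := (PySem.List.index?_isSome_iff bks s).mp (by rw [hn]; rfl)
      rw [hnone s hmem] at hend; exact Bool.false_ne_true hend
    rw [hnil, Option.map_none]
    exact (PySem.List.min?_eq_none_iff _ _).mpr rfl
  | some n0 =>
    obtain ⟨hlt, hp, hmin⟩ := List.findIdx?_eq_some_iff_getElem.mp hf
    have hself : (n0 : Int) ∈ pvCandsB (pvIdxB bks) (pvLensB (pvIdxB bks)) x := by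
      apply (pvCands_mem bks x _).mpr
      have hmem : bks[n0] ∈ bks := List.getElem_mem hlt
      obtain ⟨n', hn'⟩ := Option.isSome_iff_exists.mp ((PySem.List.index?_isSome_iff bks _).mpr hmem)
      obtain ⟨hk, hkeq, hkmin⟩ := PySem.List.getElem_of_index?_eq_some hn'
      have hn0n' : n' = n0 := by
        rcases lt_trichotomy n' n0 with h | h | h
        · exact absurd (show PySem.Str.endswith x bks[n'] = true by rw [hkeq]; exact hp)
            (hmin n' h)
        · exact h
        · exact absurd rfl (hkmin n0 h)
      exact ⟨bks[n0], n', hn', by rw [hn0n'], hp⟩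
    have hlow : ∀ j ∈ pvCandsB (pvIdxB bks) (pvLensB (pvIdxB bks)) x, (n0 : Int) ≤ j := by
      intro j hj
      obtain ⟨s, n, hn, rfl, hend⟩ := (pvCands_mem bks x _).mp hj
      obtain ⟨hk, hkeq, _⟩ := PySem.List.getElem_of_index?_eq_some hn
      have hle : n0 ≤ n := by
        by_contra h
        push_neg at h
        exact (hmin n h) (by rw [hkeq]; exact hend)
      exact_mod_cast hle
    cases hm : PySem.List.min? (pvCandsB (pvIdxB bks) (pvLensB (pvIdxB bks)) x) (fun j => j) with
    | none =>
      rw [PySem.List.min?_eq_none_iff] at hm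
      rw [hm] at hself; simp at hself
    | some m =>
      have hmmem := PySem.List.min?_mem hm
      have h1 : m ≤ (n0 : Int) := PySem.List.min?_isMin hm _ hself
      have h2 : (n0 : Int) ≤ m := hlow m hmmem
      rw [Option.map_some, le_antisymm h1 h2]

-- the fuse branch agrees real-key by real-key
theorem pvFuse_eq (keys : List String) (skr : List String) :
    pvFuseA keys.dropLast skr = pvFuseB keys skr := by
  induction skr with
  | nil => rfl
  | cons x rest ih =>
    simp only [pvFuseA, pvFuseB, pvFuseLoopB] at *
    rw [pvEndsA_eq, pvMin_cands]
    cases hf : List.findIdx? (fun b => PySem.Str.endswith x b) keys.dropLast with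
    | none => simpa using ih
    | some n0 =>
      obtain ⟨hlt, _, _⟩ := List.findIdx?_eq_some_iff_getElem.mp hf
      have hidx : PySem.List.pyGetD keys ((n0 : Nat) : Int) "" = keys.dropLast.getD n0 "" := by
        have h1 : n0 < keys.length := by
          have h2 := hlt; rw [List.length_dropLast] at h2; omega
        rw [PySem.List.pyGetD_natCast, List.getD_eq_getElem _ _ h1,
          List.getD_eq_getElem _ _ hlt]
        exact (List.getElem_dropLast hlt).symm
      simp only [Option.map_some]
      rw [hidx]
      by_cases hp : PySem.Str.replace x (keys.dropLast.getD n0 "") "" ≠ "" <;> simp [hp, ih]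

-- ===== VERDICT (by name: the statement is the Claim_ definition above) =====
theorem resolve_prefix_keys_for_fuse_and_split_py_spec : Claim_equal_resolve_prefix_keys_for_fuse_and_split_py := by
  intro skb skr ie isf _ _
  unfold Spec_resolve_prefix_keys_for_fuse_and_split_py
  unfold resolve_prefix_keys_for_fuse_and_split_py resolve_prefix_keys_for_fuse_and_split_py_alt
  have hstep : (fun (d : PySem.Dict (List String) (List String)) keys =>
      d.insert keys (keys.map (fun k =>
        (if isf then pvFuseA keys.dropLast skr else pvSplitA (PySem.List.pyGetD keys (-1) "") skr) ++ k)))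
    = (fun (d : PySem.Dict (List String) (List String)) keys =>
      d.insert keys (keys.map (fun k =>
        (if isf then pvFuseB keys skr else pvSplitB (PySem.List.pyGetD keys (-1) "") skr) ++ k))) := by
    funext d keys
    rw [pvFuse_eq, pvSplit_eq]
  simp only [] at *
  rw [hstep]
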